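-- pv_equiv track=rewrite | github.com/ayfeng23/assignment1-basics | cs336_basics/bpe.py | update_counter
-- ===== SOURCE A (Python) =====
-- def update_counter(counter, merge_token1, merge_token2):
--     merged_token = merge_token1 + merge_token2
--     edits = []
--     for item in counter.keys():
--         if merge_token1 not in item:
--             continue
--         elif merge_token2 not in item:
--             continue
--
--         old_item = item
--         item = list(item)
--         mergeable_tokens = []
--         for i in range(len(item) - 1):
--             if (item[i], item[i + 1]) == (merge_token1, merge_token2):
--                 mergeable_tokens.append(i)
--
--         for i in range(len(mergeable_tokens)):
--             if mergeable_tokens[i] == -2: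
--                 continue
--             item[mergeable_tokens[i]] = merged_token
--             if i != len(mergeable_tokens) - 1:
--                 if mergeable_tokens[i + 1] == mergeable_tokens[i] + 1:
--                     mergeable_tokens[i+1] = -2
--             if mergeable_tokens[i] != len(item) - 1:
--                 item[mergeable_tokens[i] + 1] = None
--
--         item = [item for item in item if item != None]
--         if item != list(old_item):
--             edits.append((item, old_item))
--
--     for item, old_item in edits:
--         if len(item) > 1:
--             counter[tuple(item)] = counter.pop(old_item)
--         else:
--             counter.pop(old_item)
--     return counter
-- ===== SOURCE B (Python) =====
-- def update_counter(counter, merge_token1, merge_token2):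
--     merged_token = merge_token1 + merge_token2
--     edits = []
--     for old_item in counter.keys():
--         new_item = []
--         i = 0
--         n = len(old_item)
--         while i < n:
--             if i + 1 < n and old_item[i] == merge_token1 and old_item[i + 1] == merge_token2:
--                 new_item.append(merged_token)
--                 i += 2
--             else:
--                 new_item.append(old_item[i])
--                 i += 1
--         if new_item != list(old_item):
--             edits.append((new_item, old_item))
--
--     for item, old_item in edits:
--         count = counter.pop(old_item)
--         if len(item) > 1:
--             counter[tuple(item)] = count
--     return counter
-- ===== Notes on version B (the rewrite author's own statement) =====
-- stated objective: simpler
-- what changed: Replaces A's three inner passes per key (collect pair indices, patch the list via a -2 sentinel loop writing None placeholders, filter the Nones) with one left-to-right greedy pass that builds the merged list directly; the two-phase edit-then-apply structure over the dict is kept.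
import Mathlib
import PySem

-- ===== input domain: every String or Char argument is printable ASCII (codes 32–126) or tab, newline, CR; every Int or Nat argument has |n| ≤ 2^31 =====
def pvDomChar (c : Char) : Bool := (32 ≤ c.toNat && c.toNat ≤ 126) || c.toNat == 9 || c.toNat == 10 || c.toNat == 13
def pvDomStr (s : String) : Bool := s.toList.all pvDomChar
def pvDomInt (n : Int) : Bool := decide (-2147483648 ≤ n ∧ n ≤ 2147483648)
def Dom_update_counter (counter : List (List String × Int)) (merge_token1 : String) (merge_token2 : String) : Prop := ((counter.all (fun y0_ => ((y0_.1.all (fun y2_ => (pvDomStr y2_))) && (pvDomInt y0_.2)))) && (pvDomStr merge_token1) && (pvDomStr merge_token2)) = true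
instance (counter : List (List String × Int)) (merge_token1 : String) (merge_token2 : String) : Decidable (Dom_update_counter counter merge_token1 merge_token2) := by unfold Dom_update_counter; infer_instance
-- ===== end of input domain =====

-- B replaces A's three inner passes per key (collect pair indices, sentinel-patch with None
-- placeholders, filter) by one greedy left-to-right pass; the edit-then-apply dict phase is kept.
-- Both the Python A and the Python B mutate `counter` in place the same way and return it;
-- the equivalence proved here is about the returned association list.

-- ===== PORT A =====
-- A's pair-index collection: `for i in range(len(item)-1): if (item[i],item[i+1])==(t1,t2): append(i)`.
-- Every index i and i+1 is in range, so List.getD's default is never consulted (exact).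
def pvFindPairs (t1 t2 : String) (item : List String) : List Int :=
  (List.range (item.length - 1)).foldl
    (fun acc i => if item.getD i "" = t1 ∧ item.getD (i + 1) "" = t2 then acc ++ [(i : Int)] else acc) []

-- A's sentinel loop `for i in range(len(mergeable_tokens)): …` mutating `item` in place.
-- The loop over the index range becomes recursion over the remaining list; the in-place write
-- `mergeable_tokens[i+1] = -2` becomes replacing the head of the still-unvisited remainder.
-- Every index written is nonnegative and in range, so `.toNat` is exact here.
def pvPatch (merged : String) (ps : List Int) (item : List (Option String)) : List (Option String) :=
  match ps with
  | [] => item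
  | p :: rest =>
    if p = -2 then pvPatch merged rest item
    else
      let item1 := item.set p.toNat (some merged)
      let item2 := if p ≠ (item1.length : Int) - 1 then item1.set (p + 1).toNat none else item1
      match rest with
      | [] => item2
      | q :: rest2 =>
        if q = p + 1 then pvPatch merged ((-2) :: rest2) item2
        else pvPatch merged (q :: rest2) item2
termination_by ps.length
decreasing_by all_goals simp

-- `item = [item for item in item if item != None]`
def pvMergeA (t1 t2 : String) (item : List String) : List String :=
  (pvPatch (t1 ++ t2) (pvFindPairs t1 t2 item) (item.map some)).filterMap id

def update_counter (counter : List (List String × Int)) (merge_token1 : String) (merge_token2 : String) : List (List String × Int) :=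
  let edits := counter.foldl
    (fun edits kv =>
      if merge_token1 ∉ kv.1 then edits
      else if merge_token2 ∉ kv.1 then edits
      else
        let newItem := pvMergeA merge_token1 merge_token2 kv.1
        if newItem ≠ kv.1 then edits ++ [(newItem, kv.1)] else edits)
    []
  -- `counter[tuple(item)] = counter.pop(old_item)` / `counter.pop(old_item)`; the popped key is
  -- always a present dict key, so `getD _ 0`'s default is never consulted (exact on dict inputs).
  (edits.foldl
    (fun d e =>
      let v := PySem.Dict.getD d e.2 0
      let d := PySem.Dict.erase d e.2
      if e.1.length > 1 then PySem.Dict.insert d e.1 v else d)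
    (PySem.Dict.mk counter)).items

-- ===== PORT B =====
-- one greedy left-to-right pass (Source B's while loop over old_item)
def pvMergeB (t1 t2 : String) : List String → List String
  | [] => []
  | [a] => [a]
  | a :: b :: rest =>
    if a = t1 ∧ b = t2 then (t1 ++ t2) :: pvMergeB t1 t2 rest
    else a :: pvMergeB t1 t2 (b :: rest)

def update_counter_alt (counter : List (List String × Int)) (merge_token1 : String) (merge_token2 : String) : List (List String × Int) :=
  let edits := counter.foldl
    (fun edits kv =>
      let newItem := pvMergeB merge_token1 merge_token2 kv.1
      if newItem ≠ kv.1 then edits ++ [(newItem, kv.1)] else edits)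
    []
  (edits.foldl
    (fun d e =>
      let v := PySem.Dict.getD d e.2 0
      let d := PySem.Dict.erase d e.2
      if e.1.length > 1 then PySem.Dict.insert d e.1 v else d)
    (PySem.Dict.mk counter)).items

-- ===== PRECONDITION & SPEC =====
def Spec_update_counter (counter : List (List String × Int)) (merge_token1 : String) (merge_token2 : String) (out : List (List String × Int)) : Prop := out = update_counter_alt counter merge_token1 merge_token2
instance (counter : List (List String × Int)) (merge_token1 : String) (merge_token2 : String) (out : List (List String × Int)) : Decidable (Spec_update_counter counter merge_token1 merge_token2 out) := by unfold Spec_update_counter; infer_instance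

-- ===== CLAIM (what is proved, stated in full; the proofs are below) =====
def Claim_equal_update_counter : Prop := ∀ (counter : List (List String × Int)) (merge_token1 : String) (merge_token2 : String), Dom_update_counter counter merge_token1 merge_token2 → Spec_update_counter counter merge_token1 merge_token2 (update_counter counter merge_token1 merge_token2)

-- ===== LEMMAS AND PROOFS =====

-- recursive characterisation of A's pair-index list
def pvPairs (t1 t2 : String) : List String → List Int
  | [] => []
  | [_] => []
  | a :: b :: r => (if a = t1 ∧ b = t2 then [0] else []) ++ (pvPairs t1 t2 (b :: r)).map (· + 1)

theorem pvFold_filter (P : Nat → Prop) [DecidablePred P] (l : List Nat) (acc : List Int) :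
    l.foldl (fun acc i => if P i then acc ++ [(i : Int)] else acc) acc
      = acc ++ (l.filter (fun i => decide (P i))).map Int.ofNat := by
  induction l generalizing acc with
  | nil => simp
  | cons x xs ih =>
    simp only [List.foldl_cons, List.filter_cons]
    by_cases h : P x <;> simp [h, ih]

theorem pvFindPairs_key (t1 t2 : String) (l : List String) :
    pvFindPairs t1 t2 l
      = ((List.range (l.length - 1)).filter
          (fun i => decide (l.getD i "" = t1 ∧ l.getD (i + 1) "" = t2))).map Int.ofNat := by
  simpa using pvFold_filter (fun i => l.getD i "" = t1 ∧ l.getD (i + 1) "" = t2)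
    (List.range (l.length - 1)) []

theorem pvMap_ofNat_succ (l : List Nat) :
    (l.map Nat.succ).map Int.ofNat = (l.map Int.ofNat).map (· + 1) := by
  induction l with
  | nil => rfl
  | cons x xs ih =>
    simp only [List.map_cons, ih, Nat.succ_eq_add_one]
    congr 1

theorem pvFindPairs_eq (t1 t2 : String) : ∀ item, pvFindPairs t1 t2 item = pvPairs t1 t2 item := by
  intro item
  induction item using pvPairs.induct with
  | case1 => rfl
  | case2 a => rfl
  | case3 a b r ih =>
    rw [pvFindPairs_key] at ih ⊢
    have hr : (a :: b :: r).length - 1 = r.length + 1 := by simp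
    have hlen : (b :: r).length - 1 = r.length := by simp
    rw [hlen] at ih
    have hcomp : ((fun i => decide ((a :: b :: r).getD i "" = t1 ∧ (a :: b :: r).getD (i + 1) "" = t2)) ∘ Nat.succ)
        = fun i => decide ((b :: r).getD i "" = t1 ∧ (b :: r).getD (i + 1) "" = t2) := by
      funext i
      simp [Function.comp]
    rw [hr, List.range_succ_eq_map, List.filter_cons, List.filter_map, hcomp]
    simp only [pvPairs]
    by_cases hab : a = t1 ∧ b = t2
    · have h0 : decide ((a :: b :: r).getD 0 "" = t1 ∧ (a :: b :: r).getD (0 + 1) "" = t2) = true := by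
        simpa using hab
      rw [if_pos h0, if_pos hab]
      simp only [List.map_cons, pvMap_ofNat_succ, ih, List.singleton_append]
      rfl
    · have h0 : ¬ decide ((a :: b :: r).getD 0 "" = t1 ∧ (a :: b :: r).getD (0 + 1) "" = t2) = true := by
        simpa using hab
      rw [if_neg h0, if_neg hab]
      rw [pvMap_ofNat_succ, ih, List.nil_append]

theorem pvPairs_nonneg (t1 t2 : String) : ∀ item, ∀ p ∈ pvPairs t1 t2 item, 0 ≤ p := by
  intro item
  induction item using pvPairs.induct with
  | case1 => simp [pvPairs]
  | case2 => simp [pvPairs]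
  | case3 a b r ih =>
    intro p hp
    simp only [pvPairs, List.mem_append, List.mem_map] at hp
    rcases hp with hp | ⟨q, hq, rfl⟩
    · split at hp <;> simp_all
    · have := ih q hq; omega

-- the `item` state after processing one non-sentinel index p (A's two writes)
def pvItem2 (merged : String) (p : Int) (item : List (Option String)) : List (Option String) :=
  if p ≠ ((item.set p.toNat (some merged)).length : Int) - 1
  then (item.set p.toNat (some merged)).set (p + 1).toNat none
  else item.set p.toNat (some merged)

theorem pvPatch_nil (merged : String) (item : List (Option String)) :
    pvPatch merged [] item = item := by rw [pvPatch]

theorem pvPatch_skip (merged : String) (rest : List Int) (item : List (Option String)) :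
    pvPatch merged ((-2) :: rest) item = pvPatch merged rest item := by
  rw [pvPatch]; simp

theorem pvPatch_one (merged : String) (p : Int) (hp : p ≠ -2) (item : List (Option String)) :
    pvPatch merged [p] item = pvItem2 merged p item := by
  rw [pvPatch]; simp [hp, pvItem2]

theorem pvPatch_cons2 (merged : String) (p q : Int) (rest2 : List Int) (hp : p ≠ -2)
    (item : List (Option String)) :
    pvPatch merged (p :: q :: rest2) item =
      if q = p + 1 then pvPatch merged ((-2) :: rest2) (pvItem2 merged p item)
      else pvPatch merged (q :: rest2) (pvItem2 merged p item) := by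
  rw [pvPatch]; simp [hp, pvItem2]

theorem pvSet_cons_shift (x : Option String) (l : List (Option String)) (p : Int) (hp : 1 ≤ p)
    (v : Option String) : (x :: l).set p.toNat v = x :: l.set (p - 1).toNat v := by
  have h : p.toNat = (p - 1).toNat + 1 := by omega
  rw [h]
  rfl

theorem pvItem2_cons_shift (merged : String) (p : Int) (hp : 1 ≤ p) (x : Option String)
    (l : List (Option String)) :
    pvItem2 merged p (x :: l) = x :: pvItem2 merged (p - 1) l := by
  unfold pvItem2
  rw [pvSet_cons_shift x l p hp]
  simp only [List.length_cons, List.length_set]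
  push_cast
  by_cases hc : p = (l.length : Int)
  · have h1 : ¬ (p ≠ (l.length + 1 : Int) - 1) := by omega
    have h2 : ¬ (p - 1 ≠ (l.length : Int) - 1) := by omega
    rw [if_neg h1, if_neg h2]
  · have h1 : p ≠ (l.length + 1 : Int) - 1 := by omega
    have h2 : p - 1 ≠ (l.length : Int) - 1 := by omega
    rw [if_pos h1, if_pos h2]
    rw [pvSet_cons_shift _ _ (p + 1) (by omega)]
    have h3 : p + 1 - 1 = p - 1 + 1 := by omega
    rw [h3]

theorem pvPatch_shift (merged : String) :
    ∀ (n : Nat) (ps : List Int), ps.length ≤ n →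
      (∀ p ∈ ps, p = -2 ∨ 1 ≤ p) → ∀ (x : Option String) (l : List (Option String)),
      pvPatch merged ps (x :: l)
        = x :: pvPatch merged (ps.map fun p => if p = -2 then -2 else p - 1) l := by
  intro n
  induction n with
  | zero =>
    intro ps hlen _ x l
    have hnil : ps = [] := by cases ps <;> simp_all
    subst hnil
    simp [pvPatch_nil]
  | succ n IH =>
    intro ps hlen hmem x l
    cases ps with
    | nil => simp [pvPatch_nil]
    | cons p rest =>
      rcases hmem p List.mem_cons_self with hp | hp
      · subst hp
        rw [pvPatch_skip]
        have : (((-2 : Int) :: rest).map fun p => if p = -2 then -2 else p - 1)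
            = -2 :: (rest.map fun p => if p = -2 then -2 else p - 1) := by simp
        rw [this, pvPatch_skip]
        exact IH rest (by simpa using hlen) (fun q hq => hmem q (List.mem_cons_of_mem _ hq)) x l
      · have hp2 : p ≠ -2 := by omega
        have hfp2 : ¬ (p - 1 = -2) := by omega
        have hmap : ((p :: rest).map fun r => if r = -2 then -2 else r - 1)
            = (p - 1) :: (rest.map fun r => if r = -2 then -2 else r - 1) := by simp [hp2]
        rw [hmap]
        cases rest with
        | nil =>
          rw [pvPatch_one merged p hp2, List.map_nil, pvPatch_one merged (p - 1) hfp2]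
          exact pvItem2_cons_shift merged p hp x l
        | cons q rest2 =>
          have hlen2 : ((-2 : Int) :: rest2).length ≤ n := by
            simp only [List.length_cons] at hlen ⊢; omega
          have hlen3 : (q :: rest2).length ≤ n := by
            simp only [List.length_cons] at hlen ⊢; omega
          have hmem2 : ∀ r ∈ ((-2 : Int) :: rest2), r = -2 ∨ 1 ≤ r := by
            intro r hr
            rcases List.mem_cons.1 hr with rfl | hr
            · exact Or.inl rfl
            · exact hmem r (by simp [hr])
          have hmem3 : ∀ r ∈ q :: rest2, r = -2 ∨ 1 ≤ r := fun r hr =>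
            hmem r (List.mem_cons_of_mem p hr)
          rw [pvPatch_cons2 merged p q rest2 hp2, List.map_cons,
            pvPatch_cons2 merged (p - 1) _ _ hfp2, pvItem2_cons_shift merged p hp x l]
          rcases hmem3 q List.mem_cons_self with hq | hq
          · subst hq
            have hqne : ¬ ((-2 : Int) = p + 1) := by omega
            have hqne2 : ¬ ((if (-2 : Int) = -2 then (-2 : Int) else -2 - 1) = p - 1 + 1) := by
              omega
            rw [if_neg hqne, if_neg hqne2]
            rw [IH ((-2) :: rest2) hlen2 hmem2 x _]
            simp
          · have hq2 : q ≠ -2 := by omega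
            have hfq : (if q = -2 then (-2 : Int) else q - 1) = q - 1 := if_neg hq2
            by_cases hqq : q = p + 1
            · have hq3 : q - 1 = p - 1 + 1 := by omega
              rw [if_pos hqq, hfq, if_pos hq3]
              rw [IH ((-2) :: rest2) hlen2 hmem2 x _]
              simp
            · have hq3 : ¬ (q - 1 = p - 1 + 1) := by omega
              rw [if_neg hqq, hfq, if_neg hq3]
              rw [IH (q :: rest2) hlen3 hmem3 x _]
              simp [hq2]

theorem pvMap_unshift (Q : List Int) (hQ : ∀ q ∈ Q, 0 ≤ q) :
    (Q.map (· + 1)).map (fun p => if p = -2 then -2 else p - 1) = Q := by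
  induction Q with
  | nil => simp
  | cons q qs ih =>
    have h0 : 0 ≤ q := hQ q (by simp)
    have : ¬ (q + 1 = -2) := by omega
    simp [this, ih fun q hq => hQ q (by simp [hq])]

theorem pvPatch_shift1 (merged : String) (Q : List Int) (hQ : ∀ q ∈ Q, 0 ≤ q)
    (x : Option String) (l : List (Option String)) :
    pvPatch merged (Q.map (· + 1)) (x :: l) = x :: pvPatch merged Q l := by
  rw [pvPatch_shift merged (Q.map (· + 1)).length (Q.map (· + 1)) le_rfl
    (by intro p hp; obtain ⟨q, hq, rfl⟩ := List.mem_map.1 hp; right; have := hQ q hq; omega)]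
  rw [pvMap_unshift Q hQ]

theorem pvItem2_zero (merged : String) (x y : Option String) (l : List (Option String)) :
    pvItem2 merged 0 (x :: y :: l) = some merged :: none :: l := by
  unfold pvItem2
  have h0 : ((0 : Int)).toNat = 0 := rfl
  have h1 : ((0 : Int) + 1).toNat = 1 := rfl
  rw [h0, h1]
  have hc : (0 : Int) ≠ (((x :: y :: l).set 0 (some merged)).length : Int) - 1 := by
    simp only [List.length_set, List.length_cons]
    push_cast
    omega
  rw [if_pos hc]
  rfl

theorem pvPatch_zero_step (merged : String) (QQ : List Int) (hQQ : ∀ q ∈ QQ, 2 ≤ q)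
    (item : List (Option String)) :
    pvPatch merged (0 :: QQ) item = pvPatch merged QQ (pvItem2 merged 0 item) := by
  cases QQ with
  | nil =>
    rw [pvPatch_one merged 0 (by omega), pvPatch_nil]
  | cons z zs =>
    have hz : z ≠ 0 + 1 := by have := hQQ z List.mem_cons_self; omega
    rw [pvPatch_cons2 merged 0 z zs (by omega), if_neg hz]

theorem pvPatch_zero_one_step (merged : String) (QQ : List Int) (item : List (Option String)) :
    pvPatch merged (0 :: 1 :: QQ) item = pvPatch merged QQ (pvItem2 merged 0 item) := by
  rw [pvPatch_cons2 merged 0 1 QQ (by omega), if_pos (show (1 : Int) = 0 + 1 by norm_num),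
    pvPatch_skip]

theorem pvPatch_shift2 (merged : String) (Q : List Int) (hQ : ∀ q ∈ Q, 0 ≤ q)
    (x y : Option String) (l : List (Option String)) :
    pvPatch merged ((Q.map (· + 1)).map (· + 1)) (x :: y :: l)
      = x :: y :: pvPatch merged Q l := by
  rw [pvPatch_shift1 merged (Q.map (· + 1))
    (by intro q hq; obtain ⟨q', hq', rfl⟩ := List.mem_map.1 hq; have := hQ q' hq'; omega)]
  rw [pvPatch_shift1 merged Q hQ]

theorem pvFilterMap_mm (m : String) (L : List (Option String)) :
    (some m :: none :: L).filterMap id = m :: L.filterMap id := by simp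

theorem pvFilterMap_cons (a : String) (L : List (Option String)) :
    (some a :: L).filterMap id = a :: L.filterMap id := by simp

theorem pvMergeCore_eq (t1 t2 : String) :
    ∀ item, (pvPatch (t1 ++ t2) (pvPairs t1 t2 item) (item.map some)).filterMap id
      = pvMergeB t1 t2 item := by
  intro item
  induction item using pvMergeB.induct (t1 := t1) (t2 := t2) with
  | case1 => simp [pvPairs, pvPatch_nil, pvMergeB]
  | case2 a => simp [pvPairs, pvPatch_nil, pvMergeB]
  | case3 a b r hab ih =>
    simp only [pvMergeB, if_pos hab]
    cases r with
    | nil =>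
      simp only [pvPairs, if_pos hab, List.map_nil, List.singleton_append,
        List.map_cons]
      rw [pvPatch_one (t1 ++ t2) 0 (by omega), pvItem2_zero]
      rfl
    | cons c r' =>
      have hQnn : ∀ q ∈ pvPairs t1 t2 (c :: r'), 0 ≤ q := pvPairs_nonneg t1 t2 (c :: r')
      simp only [List.map_cons]
      by_cases hbc : b = t1 ∧ c = t2
      · have hps : pvPairs t1 t2 (a :: b :: c :: r')
            = 0 :: 1 :: ((pvPairs t1 t2 (c :: r')).map (· + 1)).map (· + 1) := by
          simp only [pvPairs, if_pos hab, if_pos hbc]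
          simp [List.map_map]
        rw [hps, pvPatch_zero_one_step, pvItem2_zero,
          pvPatch_shift2 (t1 ++ t2) _ hQnn, pvFilterMap_mm]
        simp only [List.map_cons] at ih
        rw [ih]
      · have hps : pvPairs t1 t2 (a :: b :: c :: r')
            = 0 :: ((pvPairs t1 t2 (c :: r')).map (· + 1)).map (· + 1) := by
          simp only [pvPairs, if_pos hab, if_neg hbc]
          simp [List.map_map]
        rw [hps, pvPatch_zero_step (t1 ++ t2) _
            (by intro q hq
                simp only [List.mem_map] at hq
                obtain ⟨q1, ⟨q0, hq0, rfl⟩, rfl⟩ := hq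
                have := hQnn q0 hq0
                omega),
          pvItem2_zero, pvPatch_shift2 (t1 ++ t2) _ hQnn, pvFilterMap_mm]
        simp only [List.map_cons] at ih
        rw [ih]
  | case4 a b r hnab ih =>
    have hps : pvPairs t1 t2 (a :: b :: r) = (pvPairs t1 t2 (b :: r)).map (· + 1) := by
      simp only [pvPairs, if_neg hnab, List.nil_append]
    simp only [List.map_cons] at ih ⊢
    rw [hps, pvPatch_shift1 (t1 ++ t2) _ (pvPairs_nonneg t1 t2 (b :: r)), pvFilterMap_cons, ih]
    simp only [pvMergeB, if_neg hnab]

theorem pvMergeA_eq_pvMergeB (t1 t2 : String) :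
    ∀ item, pvMergeA t1 t2 item = pvMergeB t1 t2 item := by
  intro item
  rw [pvMergeA, pvFindPairs_eq]
  exact pvMergeCore_eq t1 t2 item

theorem pvMergeB_not_mem₁ (t1 t2 : String) : ∀ item, t1 ∉ item → pvMergeB t1 t2 item = item := by
  intro item
  induction item using pvMergeB.induct (t1 := t1) (t2 := t2) with
  | case1 => intro _; rfl
  | case2 => intro _; rfl
  | case3 a b r h ih =>
    intro hm
    exact absurd (show t1 ∈ a :: b :: r by simp [h.1]) hm
  | case4 a b r h ih =>
    intro hm
    simp only [pvMergeB, if_neg h]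
    rw [ih fun hc => hm (List.mem_cons_of_mem a hc)]

theorem pvMergeB_not_mem₂ (t1 t2 : String) : ∀ item, t2 ∉ item → pvMergeB t1 t2 item = item := by
  intro item
  induction item using pvMergeB.induct (t1 := t1) (t2 := t2) with
  | case1 => intro _; rfl
  | case2 => intro _; rfl
  | case3 a b r h ih =>
    intro hm
    exact absurd (show t2 ∈ a :: b :: r by simp [h.2]) hm
  | case4 a b r h ih =>
    intro hm
    simp only [pvMergeB, if_neg h]
    rw [ih fun hc => hm (List.mem_cons_of_mem a hc)]

theorem pvFoldl_funext {α β : Type} (f g : α → β → α) (h : ∀ a b, f a b = g a b) :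
    ∀ (l : List β) (acc : α), l.foldl f acc = l.foldl g acc := by
  intro l
  induction l with
  | nil => intro acc; rfl
  | cons x xs ih => intro acc; simp only [List.foldl_cons, h, ih]

-- ===== VERDICT (by name: the statement is the Claim_ definition above) =====
theorem update_counter_spec : Claim_equal_update_counter := by
  intro counter t1 t2 _
  unfold Spec_update_counter update_counter update_counter_alt
  have hstep : ∀ (edits : List (List String × List String)) (kv : List String × Int),
      (if t1 ∉ kv.1 then edits
       else if t2 ∉ kv.1 then edits
       else
         let newItem := pvMergeA t1 t2 kv.1
         if newItem ≠ kv.1 then edits ++ [(newItem, kv.1)] else edits)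
      = (let newItem := pvMergeB t1 t2 kv.1
         if newItem ≠ kv.1 then edits ++ [(newItem, kv.1)] else edits) := by
    intro edits kv
    by_cases h1 : t1 ∈ kv.1
    · by_cases h2 : t2 ∈ kv.1
      · simp [h1, h2, pvMergeA_eq_pvMergeB]
      · simp [h1, h2, pvMergeB_not_mem₂ t1 t2 kv.1 h2]
    · simp [h1, pvMergeB_not_mem₁ t1 t2 kv.1 h1]
  rw [pvFoldl_funext _ _ hstep]
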